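-- pv_equiv track=rewrite | github.com/Moomooti/coding_test | 0911.py | max_celebs_in_time_range
-- ===== SOURCE A (Python) =====
-- def max_celebs_in_time_range(celeb_times, ystart, yend):
--     max_celebs = 0
--     time_of_max = ystart
--     for t in range(ystart, yend):
--         count = 0
--         for start, end in celeb_times:
--             if start <= t < end:
--                 count += 1
--         if count > max_celebs:
--             max_celebs = count
--             time_of_max = t
--     return (time_of_max, max_celebs)
-- ===== SOURCE B (Python) =====
-- def max_celebs_in_time_range(celeb_times, ystart, yend):
--     # Sweep only candidate times (ystart plus interval starts inside the range):
--     # coverage can only increase at an interval start, so the earliest maximum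
--     # is attained at a candidate. O(n*k + k log k) instead of O((yend-ystart)*n).
--     cands = set()
--     if ystart < yend:
--         cands.add(ystart)
--         for s, e in celeb_times:
--             if ystart < s < yend:
--                 cands.add(s)
--     max_celebs = 0
--     time_of_max = ystart
--     for t in sorted(cands):
--         count = sum(1 for s, e in celeb_times if s <= t < e)
--         if count > max_celebs:
--             max_celebs = count
--             time_of_max = t
--     return (time_of_max, max_celebs)
-- ===== Notes on version B (the rewrite author's own statement) =====
-- stated objective: faster
-- what changed: B evaluates the coverage only at candidate times (ystart and each interval start clamped to the range, collected in a set and sorted) instead of scanning every integer time in [ystart, yend), since the coverage can only increase at an interval start.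
import Mathlib
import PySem

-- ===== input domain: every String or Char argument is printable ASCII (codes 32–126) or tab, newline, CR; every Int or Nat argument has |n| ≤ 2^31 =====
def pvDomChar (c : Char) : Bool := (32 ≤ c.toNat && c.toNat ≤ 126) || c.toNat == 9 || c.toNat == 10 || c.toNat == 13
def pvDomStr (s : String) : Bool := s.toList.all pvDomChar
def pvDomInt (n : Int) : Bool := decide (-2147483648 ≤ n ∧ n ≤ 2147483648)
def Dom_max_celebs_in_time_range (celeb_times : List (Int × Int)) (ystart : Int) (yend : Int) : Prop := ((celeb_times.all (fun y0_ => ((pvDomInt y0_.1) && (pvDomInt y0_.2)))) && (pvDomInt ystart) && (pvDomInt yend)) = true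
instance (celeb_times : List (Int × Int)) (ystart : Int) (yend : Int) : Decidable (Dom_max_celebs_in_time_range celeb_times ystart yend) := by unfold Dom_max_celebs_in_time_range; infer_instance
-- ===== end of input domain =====

-- B sweeps only candidate times (ystart and each interval start inside the range) instead of every
-- integer time in [ystart, yend); proved to return the same (time, count) pair on all inputs.


-- ===== PORT A =====
def max_celebs_in_time_range (celeb_times : List (Int × Int)) (ystart : Int) (yend : Int) : Int × Int :=
  let r := (PySem.List.pyRange ystart yend 1).foldl
    (fun (st : Int × Int) t =>
      let count := celeb_times.foldl (fun c p => if p.1 ≤ t ∧ t < p.2 then c + 1 else c) (0 : Int)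
      if count > st.1 then (count, t) else st)
    (0, ystart)
  (r.2, r.1)

-- ===== PORT B =====
def max_celebs_in_time_range_alt (celeb_times : List (Int × Int)) (ystart : Int) (yend : Int) : Int × Int :=
  let cands : PySem.Set Int :=
    if ystart < yend then
      celeb_times.foldl (fun s p => if ystart < p.1 ∧ p.1 < yend then PySem.Set.add s p.1 else s)
        (PySem.Set.add PySem.Set.empty ystart)
    else PySem.Set.empty
  let r := (PySem.List.sorted cands (fun x => x) false).foldl
    (fun (st : Int × Int) t =>
      let count : Int := (celeb_times.countP (fun p => decide (p.1 ≤ t) && decide (t < p.2)) : Int)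
      if count > st.1 then (count, t) else st)
    (0, ystart)
  (r.2, r.1)

-- ===== PRECONDITION & SPEC =====
def Spec_max_celebs_in_time_range (celeb_times : List (Int × Int)) (ystart : Int) (yend : Int) (out : Int × Int) : Prop := out = max_celebs_in_time_range_alt celeb_times ystart yend
instance (celeb_times : List (Int × Int)) (ystart : Int) (yend : Int) (out : Int × Int) : Decidable (Spec_max_celebs_in_time_range celeb_times ystart yend out) := by unfold Spec_max_celebs_in_time_range; infer_instance

-- ===== CLAIM (what is proved, stated in full; the proofs are below) =====
def Claim_equal_max_celebs_in_time_range : Prop := ∀ (celeb_times : List (Int × Int)) (ystart : Int) (yend : Int), Dom_max_celebs_in_time_range celeb_times ystart yend → Spec_max_celebs_in_time_range celeb_times ystart yend (max_celebs_in_time_range celeb_times ystart yend)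

-- ===== LEMMAS AND PROOFS =====

-- coverage at time t
def pvCov (ct : List (Int × Int)) (t : Int) : Int :=
  (ct.countP (fun p => decide (p.1 ≤ t) && decide (t < p.2)) : Int)

-- the common update step
def pvStep (ct : List (Int × Int)) (st : Int × Int) (t : Int) : Int × Int :=
  if pvCov ct t > st.1 then (pvCov ct t, t) else st

-- candidate predicate
def pvQ (ct : List (Int × Int)) (ystart t : Int) : Bool :=
  decide (t = ystart) || ct.any (fun p => p.1 == t)

lemma pvA_inner (ct : List (Int × Int)) (t : Int) (c : Int) :
    ct.foldl (fun c p => if p.1 ≤ t ∧ t < p.2 then c + 1 else c) c = c + pvCov ct t := by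
  induction ct generalizing c with
  | nil => simp [pvCov]
  | cons p ps ih =>
    simp only [List.foldl_cons, List.countP_cons, pvCov] at *
    by_cases h : p.1 ≤ t ∧ t < p.2
    · simp only [ih, h]
      simp
      ring
    · rw [if_neg h, ih]
      have : (decide (p.1 ≤ t) && decide (t < p.2)) = false := by
        simp only [Bool.and_eq_false_iff, decide_eq_false_iff_not]; tauto
      simp [this]

lemma pvStep_fst_ge (ct : List (Int × Int)) (st : Int × Int) (t : Int) :
    pvCov ct t ≤ (pvStep ct st t).1 := by
  unfold pvStep; split_ifs with h
  · simp
  · simpa using le_of_not_gt h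

lemma pvCov_mono (ct : List (Int × Int)) (a : Int)
    (h : ct.any (fun p => p.1 == a) = false) : pvCov ct a ≤ pvCov ct (a - 1) := by
  unfold pvCov
  have := List.countP_mono_left (l := ct)
    (p := fun p => decide (p.1 ≤ a) && decide (a < p.2))
    (q := fun p => decide (p.1 ≤ a - 1) && decide (a - 1 < p.2))
    (by
      intro p hp hpa
      simp only [Bool.and_eq_true, decide_eq_true_eq] at hpa ⊢
      have hne : ¬ (p.1 = a) := by
        simp only [List.any_eq_false, beq_iff_eq] at h
        exact h p hp
      omega)
  exact_mod_cast this

lemma pvSkip (ct : List (Int × Int)) (ystart : Int) :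
    ∀ (n : Nat) (a : Int) (st : Int × Int),
      (pvQ ct ystart a = true ∨ pvCov ct (a - 1) ≤ st.1) →
      (PySem.List.pyRange a (a + n) 1).foldl (pvStep ct) st
        = ((PySem.List.pyRange a (a + n) 1).filter (pvQ ct ystart ·)).foldl (pvStep ct) st := by
  intro n
  induction n with
  | zero => intro a st _; simp [PySem.List.pyRange_one_eq_nil (le_refl a)]
  | succ n ih =>
    intro a st hinv
    have hlt : a < a + ((n : Nat) + 1 : Nat) := by push_cast; omega
    rw [PySem.List.pyRange_one_cons hlt]
    have hre : a + ((n : Nat) + 1 : Nat) = (a + 1) + (n : Nat) := by push_cast; ring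
    rw [hre]
    by_cases hq : pvQ ct ystart a = true
    · rw [List.filter_cons_of_pos hq]
      simp only [List.foldl_cons]
      apply ih
      right
      have h1 : pvCov ct a ≤ (pvStep ct st a).1 := pvStep_fst_ge ct st a
      have he : a + 1 - 1 = a := by ring
      rw [he]; exact h1
    · rw [List.filter_cons_of_neg (by simpa using hq)]
      have hcov1 : pvCov ct (a - 1) ≤ st.1 := by
        rcases hinv with h | h
        · exact absurd h hq
        · exact h
      have hany : ct.any (fun p => p.1 == a) = false := by
        unfold pvQ at hq
        simp only [Bool.or_eq_true, not_or] at hq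
        exact Bool.not_eq_true _ ▸ (by simpa using hq.2)
      have hcov : pvCov ct a ≤ st.1 := le_trans (pvCov_mono ct a hany) hcov1
      have hstep : pvStep ct st a = st := by
        unfold pvStep; rw [if_neg (by omega)]
      simp only [List.foldl_cons, hstep]
      apply ih
      right
      have he : a + 1 - 1 = a := by ring
      rw [he]; exact hcov

lemma pvStepA_eq (ct : List (Int × Int)) :
    (fun (st : Int × Int) t =>
      let count := ct.foldl (fun c p => if p.1 ≤ t ∧ t < p.2 then c + 1 else c) (0 : Int)
      if count > st.1 then (count, t) else st) = pvStep ct := by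
  funext st t
  simp only [pvA_inner, zero_add, pvStep]

lemma pvStepB_eq (ct : List (Int × Int)) :
    (fun (st : Int × Int) t =>
      let count : Int := (ct.countP (fun p => decide (p.1 ≤ t) && decide (t < p.2)) : Int)
      if count > st.1 then (count, t) else st) = pvStep ct := by
  funext st t
  simp only [pvStep, pvCov]

lemma pvMem_candsFold (ystart yend : Int) :
    ∀ (ct : List (Int × Int)) (s : List Int) (t : Int),
      t ∈ ct.foldl (fun s p => if ystart < p.1 ∧ p.1 < yend then PySem.Set.add s p.1 else s) s
        ↔ t ∈ s ∨ ∃ p ∈ ct, p.1 = t ∧ ystart < t ∧ t < yend := by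
  intro ct
  induction ct with
  | nil => intro s t; simp
  | cons p ps ih =>
    intro s t
    simp only [List.foldl_cons]
    by_cases h : ystart < p.1 ∧ p.1 < yend
    · rw [if_pos h, ih, PySem.Set.mem_add]
      constructor
      · rintro (⟨hs | he⟩ | ⟨q, hq, h1, h2, h3⟩)
        · exact Or.inl hs
        · exact Or.inr ⟨p, by simp, he.symm, by omega⟩
        · exact Or.inr ⟨q, by simp [hq], h1, h2, h3⟩
      · rintro (hs | ⟨q, hq, h1, h2, h3⟩)
        · exact Or.inl (Or.inl hs)
        · rcases List.mem_cons.mp hq with rfl | hq'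
          · exact Or.inl (Or.inr h1.symm)
          · exact Or.inr ⟨q, hq', h1, h2, h3⟩
    · rw [if_neg h, ih]
      constructor
      · rintro (hs | ⟨q, hq, h1, h2, h3⟩)
        · exact Or.inl hs
        · exact Or.inr ⟨q, by simp [hq], h1, h2, h3⟩
      · rintro (hs | ⟨q, hq, h1, h2, h3⟩)
        · exact Or.inl hs
        · rcases List.mem_cons.mp hq with rfl | hq'
          · exact absurd ⟨h1 ▸ h2, h1 ▸ h3⟩ h
          · exact Or.inr ⟨q, hq', h1, h2, h3⟩

lemma pvNodup_candsFold (ystart yend : Int) :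
    ∀ (ct : List (Int × Int)) (s : List Int), s.Nodup →
      (ct.foldl (fun s p => if ystart < p.1 ∧ p.1 < yend then PySem.Set.add s p.1 else s) s).Nodup := by
  intro ct
  induction ct with
  | nil => intro s hs; simpa using hs
  | cons p ps ih =>
    intro s hs
    simp only [List.foldl_cons]
    split_ifs with h
    · exact ih _ (PySem.Set.nodup_add s p.1 hs)
    · exact ih _ hs

lemma pvSorted_cands_eq (ct : List (Int × Int)) (ystart yend : Int) (h : ystart < yend) :
    PySem.List.sorted
      (ct.foldl (fun s p => if ystart < p.1 ∧ p.1 < yend then PySem.Set.add s p.1 else s)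
        (PySem.Set.add PySem.Set.empty ystart)) (fun x => x) false
      = (PySem.List.pyRange ystart yend 1).filter (pvQ ct ystart ·) := by
  have hbase : PySem.Set.add PySem.Set.empty ystart = [ystart] :=
    PySem.Set.add_of_not_mem (by simp [PySem.Set.empty])
  apply PySem.List.sorted_eq_of_perm_of_pairwise_lt
  · rw [List.perm_ext_iff_of_nodup
      ((PySem.List.nodup_pyRange_one ystart yend).filter _)
      (pvNodup_candsFold ystart yend ct _ (hbase ▸ List.nodup_singleton ystart))]
    intro t
    rw [List.mem_filter, PySem.List.mem_pyRange_one, pvMem_candsFold, hbase]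
    simp only [List.mem_singleton, pvQ, Bool.or_eq_true, decide_eq_true_eq, List.any_eq_true,
      beq_iff_eq]
    constructor
    · rintro ⟨⟨h1, h2⟩, rfl | ⟨q, hq, h3⟩⟩
      · exact Or.inl rfl
      · rcases eq_or_ne t ystart with rfl | hne
        · exact Or.inl rfl
        · exact Or.inr ⟨q, hq, h3, by omega, h2⟩
    · rintro (rfl | ⟨q, hq, h1, h2, h3⟩)
      · exact ⟨⟨le_refl _, h⟩, Or.inl rfl⟩
      · exact ⟨⟨by omega, h3⟩, Or.inr ⟨q, hq, h1⟩⟩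
  · exact List.Pairwise.filter _ (PySem.List.pairwise_lt_pyRange_one ystart yend)

-- ===== VERDICT (by name: the statement is the Claim_ definition above) =====
theorem max_celebs_in_time_range_spec : Claim_equal_max_celebs_in_time_range := by
  intro ct ystart yend _
  unfold Spec_max_celebs_in_time_range max_celebs_in_time_range max_celebs_in_time_range_alt
  simp only [pvStepA_eq, pvStepB_eq]
  by_cases h : ystart < yend
  · rw [if_pos h, pvSorted_cands_eq ct ystart yend h]
    have hy : ystart + ((yend - ystart).toNat : Int) = yend := by omega
    rw [← hy]
    rw [pvSkip ct ystart ((yend - ystart).toNat) ystart (0, ystart)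
      (Or.inl (by simp [pvQ]))]
  · rw [if_neg h, PySem.List.pyRange_one_eq_nil (by omega)]
    simp [PySem.Set.empty, PySem.List.sorted]
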